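-- pv_equiv track=rewrite | github.com/Sanskarsingh0077/DATA-STRUCTURES | IMP TOPICS/DynamicProg/2054*.py | maxTwoEvents
-- ===== SOURCE A (Python) =====
-- from typing import List
--
-- def maxTwoEvents(events: List[List[int]]) -> int:
--     n = len(events)
--     events.sort()
--
--     count = 0
--     dp = {}
--
--     def binarySearch(val):
--         l = 0
--         r = n -1
--         res = n
--
--         while l <= r:
--             mid = l + (r-l)//2
--
--             if events[mid][0] > val:
--                 res = mid
--                 r = mid -1
--             else:
--                 l = mid + 1
--
--         return res
--
--
--     def solve(idx, count):
--         if count == 2 or idx >= n: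
--             return 0
--
--         if (idx, count) in dp:
--             return dp[(idx,count)]
--
--         nextValidIndex = binarySearch(events[idx][1])
--         take = events[idx][2] + solve(nextValidIndex, count+1)
--         skip = solve(idx+1, count)
--
--         dp[(idx, count)] = max(take, skip)
--
--         return dp[(idx, count)]
--
--     return solve(0, count)
-- ===== SOURCE B (Python) =====
-- def maxTwoEvents(events):
--     events.sort()
--     n = len(events)
--     # suffix maxima: suff[i] = best single-event value among events[i:], floored at 0
--     cur = 0
--     rsuff = [0]
--     for ev in reversed(events):
--         cur = max(ev[2], cur)
--         rsuff.append(cur)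
--     suff = list(reversed(rsuff))
--     best = 0
--     for ev in events:
--         # first index whose start is strictly greater than ev's end
--         lo, hi = 0, n
--         while lo < hi:
--             mid = (lo + hi) // 2
--             if events[mid][0] > ev[1]:
--                 hi = mid
--             else:
--                 lo = mid + 1
--         best = max(best, ev[2] + suff[lo])
--     return best
-- ===== Notes on version B (the rewrite author's own statement) =====
-- stated objective: alternative
-- what changed: Replaces the memoized take/skip recursion (dict dp + recursive binary search driver) with an iterative pass: a precomputed suffix-maximum array over the sorted events plus one loop that binary-searches the first compatible event and combines it with the suffix maximum.
import Mathlib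
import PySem

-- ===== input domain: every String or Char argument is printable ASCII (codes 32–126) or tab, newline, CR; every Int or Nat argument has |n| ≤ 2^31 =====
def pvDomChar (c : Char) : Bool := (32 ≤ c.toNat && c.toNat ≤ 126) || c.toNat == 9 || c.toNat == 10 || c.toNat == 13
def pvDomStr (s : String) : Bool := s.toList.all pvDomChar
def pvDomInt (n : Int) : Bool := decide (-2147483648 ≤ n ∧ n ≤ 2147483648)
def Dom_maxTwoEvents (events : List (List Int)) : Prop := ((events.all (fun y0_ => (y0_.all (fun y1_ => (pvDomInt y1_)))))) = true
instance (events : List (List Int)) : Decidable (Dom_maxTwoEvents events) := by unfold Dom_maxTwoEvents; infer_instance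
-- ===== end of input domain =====

-- B replaces A's memoized take/skip recursion by a suffix-maximum array plus one binary-searching pass
-- (objective: alternative).  Both Pythons mutate the argument identically (events.sort()); the theorems
-- below are about the return value.

-- ev[k] ; the default 0 stands for the IndexError that Pre_ excludes
def pvFld (ev : List Int) (k : Int) : Int := (PySem.List.pyGet? ev k).getD 0

-- events[i][k]
def pvEvF (es : List (List Int)) (i k : Int) : Int := pvFld ((PySem.List.pyGet? es i).getD []) k

-- ===== PORT A =====
-- A's inner `binarySearch` while-loop (l, r, res are the loop state); the Nat fuel only
-- makes the loop structural — it is at least the interval length, so it never runs out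
def pvBSA (es : List (List Int)) (n val : Int) (fuel : Nat) (l r res : Int) : Int :=
  match fuel with
  | 0 => res
  | fuel + 1 =>
    if l ≤ r then
      let mid := l + PySem.Int.floordiv (r - l) 2
      if val < pvEvF es mid 0 then pvBSA es n val fuel l (mid - 1) mid
      else pvBSA es n val fuel (mid + 1) r res
    else res

-- A's inner memoized `solve`; the dict dp is threaded through; fuel only makes the
-- recursion structural (it never runs out for the initial value passed below)
def pvSolveA (es : List (List Int)) (n : Int) (fuel : Nat) (idx count : Int)
    (dp : PySem.Dict (Int × Int) Int) : Int × PySem.Dict (Int × Int) Int :=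
  match fuel with
  | 0 => (0, dp)
  | fuel + 1 =>
    if count = 2 ∨ idx ≥ n then (0, dp)
    else
      match dp.get? (idx, count) with
      | some v => (v, dp)
      | none =>
        let nextValidIndex := pvBSA es n (pvEvF es idx 1) (es.length + 1) 0 (n - 1) n
        let r1 := pvSolveA es n fuel nextValidIndex (count + 1) dp
        let take := pvEvF es idx 2 + r1.1
        let r2 := pvSolveA es n fuel (idx + 1) count r1.2
        let dp3 := r2.2.insert (idx, count) (max take r2.1)
        (dp3.getD (idx, count) 0, dp3)

def maxTwoEvents (events : List (List Int)) : Int :=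
  let n : Int := events.length
  let es := PySem.List.sorted events (fun x => x) false
  (pvSolveA es n (3 * events.length + 6) 0 0 PySem.Dict.empty).1

-- ===== PORT B =====
-- B's while-loop binary search (lo, hi are the loop state); Nat fuel as above
def pvBSB (es : List (List Int)) (endv : Int) (fuel : Nat) (lo hi : Int) : Int :=
  match fuel with
  | 0 => lo
  | fuel + 1 =>
    if lo < hi then
      let mid := PySem.Int.floordiv (lo + hi) 2
      if endv < pvEvF es mid 0 then pvBSB es endv fuel lo mid
      else pvBSB es endv fuel (mid + 1) hi
    else lo

def maxTwoEvents_alt (events : List (List Int)) : Int :=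
  let es := PySem.List.sorted events (fun x => x) false
  let n : Int := es.length
  let st := es.reverse.foldl
      (fun (st : Int × List Int) ev =>
        let cur := max (pvFld ev 2) st.1
        (cur, st.2 ++ [cur])) (0, [0])
  let suff := st.2.reverse
  es.foldl (fun best ev =>
      let lo := pvBSB es (pvFld ev 1) (es.length + 1) 0 n
      max best (pvFld ev 2 + (PySem.List.pyGet? suff lo).getD 0)) 0

-- ===== PRECONDITION & SPEC =====
-- Pre_ excludes exactly the inputs on which Python A raises IndexError: whenever the list is
-- non-empty every event is indexed at [0], [1] and [2], so an event shorter than 3 fields raises.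
def Pre_maxTwoEvents (events : List (List Int)) : Prop := ∀ e ∈ events, 3 ≤ e.length
instance (events : List (List Int)) : Decidable (Pre_maxTwoEvents events) := by
  unfold Pre_maxTwoEvents; infer_instance

def pvWitness_maxTwoEvents : List (List Int) := [[1, 2, 4], [3, 4, 3], [2, 3, 1]]

def Spec_maxTwoEvents (events : List (List Int)) (out : Int) : Prop := out = maxTwoEvents_alt events
instance (events : List (List Int)) (out : Int) : Decidable (Spec_maxTwoEvents events out) := by unfold Spec_maxTwoEvents; infer_instance

-- ===== CLAIM (what is proved, stated in full; the proofs are below) =====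
def Claim_equal_maxTwoEvents : Prop := ∀ (events : List (List Int)), Dom_maxTwoEvents events → Pre_maxTwoEvents events → Spec_maxTwoEvents events (maxTwoEvents events)

-- ===== LEMMAS AND PROOFS =====

-- best single-event value in l, floored at 0
def pvLastBest (l : List (List Int)) : Int := l.foldr (fun ev m => max (pvFld ev 2) m) 0

-- first index of es whose start exceeds val (es.length if none)
def pvCut (es : List (List Int)) (val : Int) : Nat :=
  es.findIdx (fun ev => decide (val < pvFld ev 0))

-- start of event k
def pvS (es : List (List Int)) (k : Nat) : Int := pvEvF es (k : Int) 0

-- starts are monotone on the sorted list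
def pvMono (es : List (List Int)) : Prop :=
  ∀ j k : Nat, j ≤ k → k < es.length → pvS es j ≤ pvS es k

-- the pure value of A's memoized solve
def pvG (es : List (List Int)) (idx count : Nat) : Int :=
  if 2 ≤ count ∨ es.length ≤ idx then 0
  else
    max (pvEvF es idx 2 + pvG es (pvCut es (pvEvF es idx 1)) (count + 1))
        (pvG es (idx + 1) count)
termination_by (2 - count, es.length - idx)
decreasing_by
  · exact Prod.Lex.left _ _ (by omega)
  · exact Prod.Lex.right _ (by omega)

lemma pvEvF_eq (es : List (List Int)) (k : Nat) (hk : k < es.length) (f : Int) :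
    pvEvF es (k : Int) f = pvFld es[k] f := by
  simp [pvEvF, hk]

lemma pvFld_head (x : Int) (xs : List Int) : pvFld (x :: xs) 0 = x := by
  simp [pvFld]

lemma pvLe_head (a b : List Int) (hab : a ≤ b) (ha : a ≠ []) :
    pvFld a 0 ≤ pvFld b 0 := by
  match a, b with
  | x :: xs, y :: ys =>
    rw [pvFld_head, pvFld_head]
    by_contra hlt
    push Not at hlt
    have : (y :: ys) < (x :: xs) := List.Lex.rel hlt
    exact absurd this (not_lt_of_ge hab)
  | x :: xs, [] =>
    exact absurd (lt_of_lt_of_le (List.Lex.nil : ([] : List Int) < x :: xs) hab)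
      (lt_irrefl _)
  | [], _ => exact absurd rfl ha

lemma pvS_eq_head (es : List (List Int)) (k : Nat) (hk : k < es.length) :
    pvS es k = pvFld es[k] 0 := pvEvF_eq es k hk 0

lemma pvMono_of_sorted (events : List (List Int)) (hpre : ∀ e ∈ events, 3 ≤ e.length) :
    pvMono (PySem.List.sorted events (fun x => x) false) := by
  intro j k hjk hk
  set es := PySem.List.sorted events (fun x => x) false with hes
  have hj : j < es.length := lt_of_le_of_lt hjk hk
  rcases Nat.eq_or_lt_of_le hjk with rfl | hjk'
  · exact le_refl _
  · have hpair : es.Pairwise (fun a b => a ≤ b) := by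
      rw [hes]
      have := PySem.List.sorted_pairwise events (fun x : List Int => x)
      convert this using 2
    have hle : es[j] ≤ es[k] := List.pairwise_iff_getElem.mp hpair j k hj hk hjk'
    have hmem : es[j] ∈ events := by
      have h1 : es[j] ∈ es := es.getElem_mem hj
      exact (PySem.List.mem_sorted events (fun x : List Int => x) false es[j]).mp h1
    have hne : es[j] ≠ [] := by
      intro hnil
      have := hpre _ hmem
      simp [hnil] at this
    rw [pvS_eq_head es j hj, pvS_eq_head es k hk]
    exact pvLe_head _ _ hle hne

lemma pvCut_le (es : List (List Int)) (val : Int) : pvCut es val ≤ es.length :=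
  List.findIdx_le_length

lemma pvCut_not_lt (es : List (List Int)) (val : Int) (k : Nat) (hk : k < pvCut es val) :
    ¬ val < pvS es k := by
  have hkl : k < es.length := lt_of_lt_of_le hk (pvCut_le es val)
  have := List.not_of_lt_findIdx (p := fun ev => decide (val < pvFld ev 0)) (xs := es)
    (i := k) hk
  rw [pvS_eq_head es k hkl]
  simpa using this

lemma pvCut_lt (es : List (List Int)) (val : Int) (h : pvCut es val < es.length) :
    val < pvS es (pvCut es val) := by
  have := List.findIdx_getElem (p := fun ev => decide (val < pvFld ev 0)) (xs := es) (w := h)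
  rw [pvS_eq_head es _ h]
  simpa using this

lemma pvCut_unique (es : List (List Int)) (val : Int) (m : Nat) (hm : m ≤ es.length)
    (h1 : ∀ k : Nat, k < m → ¬ val < pvS es k)
    (h2 : m = es.length ∨ val < pvS es m) : m = pvCut es val := by
  rcases Nat.lt_trichotomy m (pvCut es val) with h | h | h
  · have hml : m < es.length := lt_of_lt_of_le h (pvCut_le es val)
    rcases h2 with rfl | h2
    · omega
    · exact absurd h2 (pvCut_not_lt es val m h)
  · exact h
  · have hcl : pvCut es val < es.length := lt_of_lt_of_le h hm
    exact absurd (pvCut_lt es val hcl) (h1 _ h)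

-- ---- A's binary search returns pvCut ----

lemma pvBSA_inv (es : List (List Int)) (val : Int) (hm : pvMono es) :
    ∀ (fm : Nat) (l r res : Int), (r - l + 1).toNat ≤ fm →
      0 ≤ l → l ≤ res → r = res - 1 → res ≤ (es.length : Int) →
      (∀ k : Nat, (k : Int) < l → ¬ val < pvS es k) →
      (res = (es.length : Int) ∨ (res.toNat < es.length ∧ val < pvS es res.toNat)) →
      pvBSA es (es.length : Int) val fm l r res = (pvCut es val : Int) := by
  intro fm
  induction fm with
  | zero =>
    intro l r res hfm hl hlres hr hres hbelow habove
    rw [pvBSA]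
    have : res.toNat = pvCut es val := by
      apply pvCut_unique
      · omega
      · intro k hk
        exact hbelow k (by omega)
      · rcases habove with h | h
        · left; omega
        · right; exact h.2
    omega
  | succ fm ih =>
    intro l r res hfm hl hlres hr hres hbelow habove
    rw [pvBSA]
    by_cases hlr : l ≤ r
    · rw [if_pos hlr]
      have hdiv : PySem.Int.floordiv (r - l) 2 = (r - l) / 2 :=
        PySem.Int.floordiv_eq_ediv_of_pos (by omega)
      set mid := l + PySem.Int.floordiv (r - l) 2 with hmid
      have hmbl : l ≤ mid := by omega
      have hmbr : mid ≤ r := by omega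
      have hmidlen : mid.toNat < es.length := by omega
      have hcast : pvEvF es mid 0 = pvS es mid.toNat := by
        rw [pvS]; congr 1; omega
      by_cases hp : val < pvEvF es mid 0
      · simp only [hp, if_true]
        refine ih l (mid - 1) mid (by omega) (by omega) (by omega) (by omega) (by omega)
          hbelow (Or.inr ⟨hmidlen, ?_⟩)
        rw [hcast] at hp; exact hp
      · simp only [hp, if_false]
        refine ih (mid + 1) r res (by omega) (by omega) (by omega) (by omega) (by omega)
          ?_ habove
        intro k hk
        by_cases hkl : (k : Int) < l
        · exact hbelow k hkl
        · intro hcontra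
          have hkm : k ≤ mid.toNat := by omega
          have := hm k mid.toNat hkm hmidlen
          rw [hcast] at hp
          omega
    · rw [if_neg hlr]
      have : res.toNat = pvCut es val := by
        apply pvCut_unique
        · omega
        · intro k hk
          exact hbelow k (by omega)
        · rcases habove with h | h
          · left; omega
          · right; exact h.2
      omega

lemma pvBSA_eq (es : List (List Int)) (val : Int) (hm : pvMono es) :
    pvBSA es (es.length : Int) val (es.length + 1) 0 ((es.length : Int) - 1) (es.length : Int)
      = (pvCut es val : Int) := by
  refine pvBSA_inv es val hm (es.length + 1) 0 _ _
    (by omega) (by omega) (by omega) (by omega) (by omega) (fun k hk => by omega) (Or.inl rfl)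

-- ---- B's binary search returns pvCut ----

lemma pvBSB_inv (es : List (List Int)) (val : Int) (hm : pvMono es) :
    ∀ (fm : Nat) (lo hi : Int), (hi - lo).toNat ≤ fm →
      0 ≤ lo → lo ≤ hi → hi ≤ (es.length : Int) →
      (∀ k : Nat, (k : Int) < lo → ¬ val < pvS es k) →
      (hi = (es.length : Int) ∨ (hi.toNat < es.length ∧ val < pvS es hi.toNat)) →
      pvBSB es val fm lo hi = (pvCut es val : Int) := by
  intro fm
  induction fm with
  | zero =>
    intro lo hi hfm h0 hlohi hhi hbelow habove
    rw [pvBSB]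
    have : lo.toNat = pvCut es val := by
      apply pvCut_unique
      · omega
      · intro k hk; exact hbelow k (by omega)
      · have heq : lo = hi := by omega
        rw [heq]
        rcases habove with h | h
        · left; omega
        · right; exact h.2
    omega
  | succ fm ih =>
    intro lo hi hfm h0 hlohi hhi hbelow habove
    rw [pvBSB]
    by_cases hlt : lo < hi
    · rw [if_pos hlt]
      have hb := PySem.Int.floordiv_two_mid_bounds (lo := lo) (hi := hi) (by omega)
      have hsb : PySem.Int.floordiv (lo + hi) 2 < hi :=
        (PySem.Int.floordiv_lt_iff_lt_mul (by omega)).mpr (by omega)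
      set mid := PySem.Int.floordiv (lo + hi) 2 with hmid
      have hmidlen : mid.toNat < es.length := by omega
      have hcast : pvEvF es mid 0 = pvS es mid.toNat := by
        rw [pvS]; congr 1; omega
      by_cases hp : val < pvEvF es mid 0
      · simp only [hp, if_true]
        refine ih lo mid (by omega) (by omega) (by omega) (by omega) hbelow
          (Or.inr ⟨hmidlen, ?_⟩)
        rw [hcast] at hp; exact hp
      · simp only [hp, if_false]
        refine ih (mid + 1) hi (by omega) (by omega) (by omega) (by omega) ?_ habove
        intro k hk
        by_cases hkl : (k : Int) < lo
        · exact hbelow k hkl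
        · intro hcontra
          have hkm : k ≤ mid.toNat := by omega
          have := hm k mid.toNat hkm hmidlen
          rw [hcast] at hp
          omega
    · rw [if_neg hlt]
      have : lo.toNat = pvCut es val := by
        apply pvCut_unique
        · omega
        · intro k hk; exact hbelow k (by omega)
        · have heq : lo = hi := by omega
          rw [heq]
          rcases habove with h | h
          · left; omega
          · right; exact h.2
      omega

lemma pvBSB_eq (es : List (List Int)) (val : Int) (hm : pvMono es) :
    pvBSB es val (es.length + 1) 0 (es.length : Int) = (pvCut es val : Int) := by
  refine pvBSB_inv es val hm (es.length + 1) 0 _ (by omega) (by omega)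
    (by omega) (by omega) (fun k hk => by omega) (Or.inl rfl)

-- ---- the pure recursion, unrolled ----

lemma pvG_two (es : List (List Int)) (i : Nat) : pvG es i 2 = 0 := by
  rw [pvG]; simp

lemma pvG_one (es : List (List Int)) (i : Nat) :
    pvG es i 1 = pvLastBest (es.drop i) := by
  induction hd : es.length - i generalizing i with
  | zero =>
    have hle : es.length ≤ i := by omega
    rw [pvG, if_pos (Or.inr hle), List.drop_eq_nil_of_le hle]
    rfl
  | succ d ihd =>
    have hi : i < es.length := by omega
    rw [pvG, if_neg (by omega), show (1 + 1 : Nat) = 2 from rfl, pvG_two,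
      List.drop_eq_getElem_cons hi]
    show _ = max (pvFld es[i] 2) (pvLastBest (es.drop (i + 1)))
    rw [pvEvF_eq es i hi 2, ihd (i + 1) (by omega), add_zero]

def pvCand (es : List (List Int)) (ev : List Int) : Int :=
  pvFld ev 2 + pvLastBest (es.drop (pvCut es (pvFld ev 1)))

lemma pvG_zero (es : List (List Int)) (i : Nat) :
    pvG es i 0 = (es.drop i).foldr (fun ev m => max (pvCand es ev) m) 0 := by
  induction hd : es.length - i generalizing i with
  | zero =>
    have hle : es.length ≤ i := by omega
    rw [pvG, if_pos (Or.inr hle), List.drop_eq_nil_of_le hle]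
    rfl
  | succ d ihd =>
    have hi : i < es.length := by omega
    rw [pvG, if_neg (by omega), pvG_one, List.drop_eq_getElem_cons hi]
    show _ = max (pvCand es es[i]) ((es.drop (i + 1)).foldr (fun ev m => max (pvCand es ev) m) 0)
    rw [pvEvF_eq es i hi 2, pvEvF_eq es i hi 1, ihd (i + 1) (by omega)]
    rfl

-- ---- B's suffix-maximum list ----

def pvScanM (c : Int) (l : List (List Int)) : List Int :=
  match l with
  | [] => []
  | ev :: t => max (pvFld ev 2) c :: pvScanM (max (pvFld ev 2) c) t

lemma pvFoldlScan (l : List (List Int)) :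
    ∀ (c : Int) (rs : List Int),
      l.foldl (fun (st : Int × List Int) ev =>
          (max (pvFld ev 2) st.1, st.2 ++ [max (pvFld ev 2) st.1])) (c, rs)
        = (l.foldl (fun m ev => max (pvFld ev 2) m) c, rs ++ pvScanM c l) := by
  induction l with
  | nil => intro c rs; simp [pvScanM]
  | cons ev t ih =>
    intro c rs
    simp only [List.foldl_cons, pvScanM, ih, List.append_assoc, List.singleton_append]

lemma pvScanM_append (l l' : List (List Int)) :
    ∀ c, pvScanM c (l ++ l')
      = pvScanM c l ++ pvScanM (l.foldl (fun m ev => max (pvFld ev 2) m) c) l' := by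
  induction l with
  | nil => intro c; simp [pvScanM]
  | cons ev t ih => intro c; simp [pvScanM, ih]

lemma pvFoldlRev (l : List (List Int)) :
    l.reverse.foldl (fun m ev => max (pvFld ev 2) m) 0 = pvLastBest l := by
  rw [List.foldl_reverse]; rfl

def pvSuffL (es : List (List Int)) : List Int :=
  match es with
  | [] => []
  | ev :: t => pvLastBest (ev :: t) :: pvSuffL t

lemma pvRevScan (es : List (List Int)) :
    (pvScanM 0 es.reverse).reverse = pvSuffL es := by
  induction es with
  | nil => rfl
  | cons ev t ih =>
    rw [List.reverse_cons, pvScanM_append, List.reverse_append, pvFoldlRev]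
    simp only [pvScanM, List.reverse_cons, List.reverse_nil, List.nil_append,
      List.singleton_append, ih]
    rfl

lemma pvSuffL_length (es : List (List Int)) : (pvSuffL es).length = es.length := by
  induction es with
  | nil => rfl
  | cons ev t ih => simp [pvSuffL, ih]

lemma pvSuffL_get (es : List (List Int)) :
    ∀ j : Nat, j < es.length → (pvSuffL es)[j]? = some (pvLastBest (es.drop j)) := by
  induction es with
  | nil => intro j hj; simp at hj
  | cons ev t ih =>
    intro j hj
    cases j with
    | zero => simp [pvSuffL]
    | succ j =>
      simp only [pvSuffL, List.getElem?_cons_succ, List.drop_succ_cons]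
      exact ih j (by simpa using hj)

lemma pvSuffAt (es : List (List Int)) (j : Nat) (hj : j ≤ es.length) :
    (PySem.List.pyGet? (pvSuffL es ++ [0]) (j : Int)).getD 0 = pvLastBest (es.drop j) := by
  rw [PySem.List.pyGet?_natCast]
  rcases Nat.eq_or_lt_of_le hj with rfl | hlt
  · rw [List.getElem?_append_right (by rw [pvSuffL_length])]
    rw [pvSuffL_length, List.drop_eq_nil_of_le (le_refl _)]
    simp [pvLastBest]
  · rw [List.getElem?_append_left (by rw [pvSuffL_length]; exact hlt), pvSuffL_get es j hlt]
    rfl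

-- ---- A's memoized solve computes pvG ----

def pvInv (es : List (List Int)) (dp : PySem.Dict (Int × Int) Int) : Prop :=
  ∀ (i c : Nat) (x : Int), dp.get? ((i : Int), (c : Int)) = some x → x = pvG es i c

lemma pvSolveA_eq (es : List (List Int)) (hm : pvMono es) :
    ∀ (fuel : Nat) (i c : Nat) (dp : PySem.Dict (Int × Int) Int), c ≤ 2 → pvInv es dp →
      (2 - c) * (es.length + 1) + (es.length - i) + 1 ≤ fuel →
      (pvSolveA es (es.length : Int) fuel (i : Int) (c : Int) dp).1 = pvG es i c ∧
      pvInv es (pvSolveA es (es.length : Int) fuel (i : Int) (c : Int) dp).2 := by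
  intro fuel
  induction fuel with
  | zero => intro i c dp hc hinv hfuel; omega
  | succ fuel ih =>
    intro i c dp hc hinv hfuel
    rw [pvSolveA]
    by_cases hg : (c : Int) = 2 ∨ (i : Int) ≥ (es.length : Int)
    · rw [if_pos hg, pvG, if_pos (by omega)]
      exact ⟨rfl, hinv⟩
    · rw [if_neg hg]
      have hglt : c < 2 ∧ i < es.length := by
        constructor <;> omega
      cases heq : dp.get? ((i : Int), (c : Int)) with
      | some v => exact ⟨hinv i c v heq, hinv⟩
      | none =>
        simp only []
        have hbs : pvBSA es (es.length : Int) (pvEvF es (i : Int) 1) (es.length + 1) 0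
            ((es.length : Int) - 1) (es.length : Int)
            = ((pvCut es (pvEvF es (i : Int) 1) : Nat) : Int) :=
          pvBSA_eq es _ hm
        set K := pvCut es (pvEvF es (i : Int) 1) with hK
        have hKle : K ≤ es.length := pvCut_le es _
        have hc1 : c + 1 ≤ 2 := by omega
        have hfuel1 : (2 - (c + 1)) * (es.length + 1) + (es.length - K) + 1 ≤ fuel := by
          interval_cases c <;> omega
        have h1 := ih K (c + 1) dp hc1 hinv hfuel1
        have hfuel2 : (2 - c) * (es.length + 1) + (es.length - (i + 1)) + 1 ≤ fuel := by
          interval_cases c <;> omega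
        rw [hbs]
        have hcast1 : ((K : Nat) : Int) = (K : Int) := rfl
        have hcast2 : ((c : Int) + 1) = ((c + 1 : Nat) : Int) := by push_cast; ring
        have hcast3 : ((i : Int) + 1) = ((i + 1 : Nat) : Int) := by push_cast; ring
        rw [hcast2, hcast3]
        have h2 := ih (i + 1) c
          (pvSolveA es (es.length : Int) fuel ((K : Nat) : Int) ((c + 1 : Nat) : Int) dp).2
          hc h1.2 hfuel2
        set r1 := pvSolveA es (es.length : Int) fuel ((K : Nat) : Int) ((c + 1 : Nat) : Int) dp
        set r2 := pvSolveA es (es.length : Int) fuel ((i + 1 : Nat) : Int) ((c : Nat) : Int) r1.2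
        have hGval : pvG es i c
            = max (pvEvF es (i : Int) 2 + pvG es K (c + 1)) (pvG es (i + 1) c) := by
          rw [pvG, if_neg (by omega)]
        constructor
        · rw [PySem.Dict.getD_insert_self, h1.1, h2.1, hGval]
        · intro i' c' x hx
          rw [PySem.Dict.get?_insert] at hx
          by_cases hkey : ((i' : Int), (c' : Int)) = ((i : Int), (c : Int))
          · rw [if_pos hkey] at hx
            have hii : i' = i ∧ c' = c := by
              constructor <;> [skip; skip] <;>
                · have := hkey
                  simp only [Prod.mk.injEq] at this
                  omega
            obtain ⟨rfl, rfl⟩ := hii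
            rw [hGval]
            cases hx
            rw [h1.1, h2.1]
          · rw [if_neg hkey] at hx
            exact h2.2 i' c' x hx

-- ---- folding the candidates left-to-right ----

lemma pvFoldrNonneg (f : List (List Int) → List Int → Int) (es : List (List Int))
    (l : List (List Int)) : 0 ≤ l.foldr (fun ev m => max (f es ev) m) 0 := by
  induction l with
  | nil => simp
  | cons ev t ih => simp only [List.foldr_cons]; exact le_trans ih (le_max_right _ _)

lemma pvFoldlMax (f : List Int → Int) (l : List (List Int)) :
    ∀ a : Int, 0 ≤ a →
      l.foldl (fun b ev => max b (f ev)) a = max a (l.foldr (fun ev m => max (f ev) m) 0) := by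
  induction l with
  | nil => intro a ha; simp; omega
  | cons ev t ih =>
    intro a ha
    simp only [List.foldl_cons, List.foldr_cons]
    rw [ih (max a (f ev)) (le_trans ha (le_max_left _ _)), max_assoc]

-- ---- the two ports compute pvG es 0 0 ----

lemma maxTwoEvents_alt_eq (events : List (List Int))
    (hpre : ∀ e ∈ events, 3 ≤ e.length) :
    maxTwoEvents_alt events = pvG (PySem.List.sorted events (fun x => x) false) 0 0 := by
  have hm := pvMono_of_sorted events hpre
  set es := PySem.List.sorted events (fun x => x) false with hes
  show List.foldl (fun best ev =>
      max best (pvFld ev 2 +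
        (PySem.List.pyGet?
          ((List.foldl (fun (st : Int × List Int) ev =>
              (max (pvFld ev 2) st.1, st.2 ++ [max (pvFld ev 2) st.1])) (0, [0]) es.reverse).2.reverse)
          (pvBSB es (pvFld ev 1) (es.length + 1) 0 (es.length : Int))).getD 0)) 0 es
    = pvG es 0 0
  have hsuff : ((List.foldl (fun (st : Int × List Int) ev =>
        (max (pvFld ev 2) st.1, st.2 ++ [max (pvFld ev 2) st.1])) (0, [0]) es.reverse).2).reverse
      = pvSuffL es ++ [0] := by
    rw [pvFoldlScan es.reverse 0 [0]]
    show (((0 : Int) :: pvScanM 0 es.reverse)).reverse = _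
    rw [List.reverse_cons, pvRevScan]
  rw [hsuff]
  have hfun : (fun (best : Int) (ev : List Int) =>
        max best (pvFld ev 2 +
          (PySem.List.pyGet? (pvSuffL es ++ [0])
            (pvBSB es (pvFld ev 1) (es.length + 1) 0 (es.length : Int))).getD 0))
      = fun (best : Int) (ev : List Int) => max best (pvCand es ev) := by
    funext best ev
    rw [pvBSB_eq es (pvFld ev 1) hm, pvSuffAt es _ (pvCut_le es _)]
    rfl
  rw [hfun, pvFoldlMax (pvCand es) es 0 (le_refl 0), pvG_zero es 0, List.drop_zero]
  have hnn := pvFoldrNonneg pvCand es es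
  omega

lemma maxTwoEvents_eq (events : List (List Int))
    (hpre : ∀ e ∈ events, 3 ≤ e.length) :
    maxTwoEvents events = pvG (PySem.List.sorted events (fun x => x) false) 0 0 := by
  have hm := pvMono_of_sorted events hpre
  set es := PySem.List.sorted events (fun x => x) false with hes
  have hlen : events.length = es.length := (PySem.List.length_sorted events _ _).symm
  show (pvSolveA es (events.length : Int) (3 * events.length + 6) 0 0 PySem.Dict.empty).1 = _
  rw [hlen]
  have hinv : pvInv es PySem.Dict.empty := by
    intro i c x hx
    rw [PySem.Dict.get?_empty] at hx
    cases hx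
  have := (pvSolveA_eq es hm (3 * es.length + 6) 0 0 PySem.Dict.empty (by omega) hinv (by omega)).1
  exact_mod_cast this

-- ===== VERDICT (by name: the statement is the Claim_ definition above) =====
theorem maxTwoEvents_spec : Claim_equal_maxTwoEvents := by
  intro events hdom hpre
  unfold Spec_maxTwoEvents
  rw [maxTwoEvents_eq events hpre, maxTwoEvents_alt_eq events hpre]
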